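-- pv_equiv track=rewrite | github.com/adityanaranje/DocumentsRAG | agents/nodes.py | _find_closest_plan_name
-- ===== SOURCE A (Python) =====
-- from typing import Dict, List, Any, Optional
--
-- def _find_closest_plan_name(query_plan: str, all_plans: List[str]) -> Optional[str]:
--     """Finds closest matching plan name using fuzzy matching."""
--     if not all_plans:
--         return query_plan
--
--     def normalize(s):
--         return s.lower().replace(" ", "").replace("-", "").replace("_", "").replace("edelweisslife", "edelweiss")
--
--     query_norm = normalize(query_plan)
--
--     # 1. Exact match (case insensitive)
--     for plan in all_plans:
--         if plan.lower() == query_plan.lower():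
--             return plan
--
--     # 2. Normalized containment match (High Confidence)
--     # Check if the plan name is mentioned in the query
--     for plan in all_plans:
--         plan_norm = normalize(plan)
--         if plan_norm in query_norm or query_norm in plan_norm:
--             return plan
--
--     # 3. Word overlap (Lower Confidence fallback)
--     query_words = set(query_plan.lower().split())
--     # REMOVED insurer names from stop_words because they are critical for distinguishing
--     # similar plan names (like 'Saral Jeevan Bima') across different companies.
--     stop_words = {"plan", "insurance", "the", "a", "of", "with", "compare", "is", "between"}
--     query_significant = query_words - stop_words
--
--     best_match = None
--     max_overlap = 0
--
--     for plan in all_plans: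
--         plan_words = set(plan.lower().split())
--         plan_significant = plan_words - stop_words
--
--         # Count significant word overlap
--         overlap = len(query_significant.intersection(plan_significant))
--
--         if overlap > max_overlap:
--             max_overlap = overlap
--             best_match = plan
--
--     # Return best match if we found significant overlap (at least 2 words)
--     return best_match if max_overlap >= 2 else query_plan
-- ===== SOURCE B (Python) =====
-- def _find_closest_plan_name(query_plan, all_plans):
--     """Single pass over all_plans maintaining the three candidates; priority resolved after the loop."""
--     if not all_plans:
--         return query_plan
--
--     def normalize(s):
--         return s.lower().replace(" ", "").replace("-", "").replace("_", "").replace("edelweisslife", "edelweiss")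
--
--     query_norm = normalize(query_plan)
--     query_lower = query_plan.lower()
--     stop_words = {"plan", "insurance", "the", "a", "of", "with", "compare", "is", "between"}
--     query_significant = set(query_plan.lower().split()) - stop_words
--
--     first_exact = None
--     first_contain = None
--     best_overlap = None
--     max_overlap = 0
--     for plan in all_plans:
--         if first_exact is None and plan.lower() == query_lower:
--             first_exact = plan
--         if first_contain is None:
--             plan_norm = normalize(plan)
--             if plan_norm in query_norm or query_norm in plan_norm:
--                 first_contain = plan
--         overlap = len(query_significant & (set(plan.lower().split()) - stop_words))
--         if overlap > max_overlap:
--             max_overlap = overlap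
--             best_overlap = plan
--
--     if first_exact is not None:
--         return first_exact
--     if first_contain is not None:
--         return first_contain
--     return best_overlap if max_overlap >= 2 else query_plan
-- ===== Notes on version B (the rewrite author's own statement) =====
-- stated objective: alternative
-- what changed: A's three sequential early-return passes over all_plans (exact, containment, overlap) are merged into one loop that maintains first_exact, first_contain and the best-overlap candidate, with the priority resolved after the loop.
import Mathlib
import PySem

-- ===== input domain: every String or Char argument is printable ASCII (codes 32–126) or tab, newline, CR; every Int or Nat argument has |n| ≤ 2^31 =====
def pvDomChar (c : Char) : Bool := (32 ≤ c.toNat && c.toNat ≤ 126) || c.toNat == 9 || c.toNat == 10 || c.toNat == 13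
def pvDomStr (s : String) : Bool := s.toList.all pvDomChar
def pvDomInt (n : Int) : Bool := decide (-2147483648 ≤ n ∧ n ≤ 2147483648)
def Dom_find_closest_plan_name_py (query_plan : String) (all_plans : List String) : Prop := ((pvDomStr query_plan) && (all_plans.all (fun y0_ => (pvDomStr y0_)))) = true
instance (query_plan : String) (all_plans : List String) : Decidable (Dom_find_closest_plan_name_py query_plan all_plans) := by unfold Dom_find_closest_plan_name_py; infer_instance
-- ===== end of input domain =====

-- B replaces A's three early-return passes over all_plans by ONE loop that tracks the first
-- exact match, the first containment match and the best word-overlap candidate, resolving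
-- the priority after the loop (objective: alternative decomposition, same cost).

-- shared code of both Pythons: normalize, stop words, significant-word set, overlap count
def pvNormalize (s : String) : String :=
  PySem.Str.replace (PySem.Str.replace (PySem.Str.replace (PySem.Str.replace
    (PySem.Str.lower s) " " "") "-" "") "_" "") "edelweisslife" "edelweiss"

def pvStopWords : PySem.Set String :=
  PySem.Set.ofList ["plan", "insurance", "the", "a", "of", "with", "compare", "is", "between"]

def pvSignificant (s : String) : PySem.Set String :=
  PySem.Set.diff (PySem.Set.ofList (PySem.Str.split₀ (PySem.Str.lower s))) pvStopWords

def pvOverlap (qsig : PySem.Set String) (plan : String) : Int :=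
  PySem.Set.len (PySem.Set.inter qsig (pvSignificant plan))

-- ===== PORT A =====
-- loop 1: exact match (case insensitive), early return
def pvLoopExact (query_plan : String) : List String → Option String
  | [] => none
  | p :: rest =>
      if PySem.Str.lower p == PySem.Str.lower query_plan then some p
      else pvLoopExact query_plan rest

-- loop 2: normalized containment match, early return
def pvLoopContain (query_norm : String) : List String → Option String
  | [] => none
  | p :: rest =>
      if PySem.Str.isIn (pvNormalize p) query_norm || PySem.Str.isIn query_norm (pvNormalize p) then some p
      else pvLoopContain query_norm rest

-- loop 3: best word overlap (strict '>', first maximum wins)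
def pvStepOverlap (qsig : PySem.Set String) (s : Option String × Int) (p : String) : Option String × Int :=
  let overlap := pvOverlap qsig p
  if overlap > s.2 then (some p, overlap) else s

def find_closest_plan_name_py (query_plan : String) (all_plans : List String) : Option String :=
  if all_plans.isEmpty then some query_plan
  else
    let query_norm := pvNormalize query_plan
    match pvLoopExact query_plan all_plans with
    | some p => some p
    | none =>
      match pvLoopContain query_norm all_plans with
      | some p => some p
      | none =>
        let qsig := pvSignificant query_plan
        let bm := all_plans.foldl (pvStepOverlap qsig) (none, 0)
        if bm.2 ≥ 2 then bm.1 else some query_plan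

-- ===== PORT B =====
-- one loop, state = (first_exact, first_contain, best_overlap, max_overlap)
def pvStepB (query_lower query_norm : String) (qsig : PySem.Set String)
    (s : Option String × Option String × Option String × Int) (p : String) :
    Option String × Option String × Option String × Int :=
  let e := if s.1.isNone && (PySem.Str.lower p == query_lower) then some p else s.1
  let c := if s.2.1.isNone &&
      (PySem.Str.isIn (pvNormalize p) query_norm || PySem.Str.isIn query_norm (pvNormalize p))
    then some p else s.2.1
  let overlap := pvOverlap qsig p
  let bm := if overlap > s.2.2.2 then (some p, overlap) else (s.2.2.1, s.2.2.2)
  (e, c, bm.1, bm.2)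

def find_closest_plan_name_py_alt (query_plan : String) (all_plans : List String) : Option String :=
  if all_plans.isEmpty then some query_plan
  else
    let query_norm := pvNormalize query_plan
    let query_lower := PySem.Str.lower query_plan
    let qsig := pvSignificant query_plan
    let st := all_plans.foldl (pvStepB query_lower query_norm qsig) (none, none, none, 0)
    match st.1 with
    | some p => some p
    | none =>
      match st.2.1 with
      | some p => some p
      | none => if st.2.2.2 ≥ 2 then st.2.2.1 else some query_plan

-- ===== PRECONDITION & SPEC =====
def Spec_find_closest_plan_name_py (query_plan : String) (all_plans : List String) (out : Option String) : Prop := out = find_closest_plan_name_py_alt query_plan all_plans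
instance (query_plan : String) (all_plans : List String) (out : Option String) : Decidable (Spec_find_closest_plan_name_py query_plan all_plans out) := by unfold Spec_find_closest_plan_name_py; infer_instance

-- ===== CLAIM (what is proved, stated in full; the proofs are below) =====
def Claim_equal_find_closest_plan_name_py : Prop := ∀ (query_plan : String) (all_plans : List String), Dom_find_closest_plan_name_py query_plan all_plans → Spec_find_closest_plan_name_py query_plan all_plans (find_closest_plan_name_py query_plan all_plans)

-- ===== LEMMAS AND PROOFS =====
-- B's single fold decomposes into A's three scans, componentwise.
theorem pvFoldB_eq (query_plan : String) (plans : List String)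
    (e c b : Option String) (m : Int) :
    plans.foldl (pvStepB (PySem.Str.lower query_plan) (pvNormalize query_plan) (pvSignificant query_plan)) (e, c, b, m) =
      ((if e.isSome then e else pvLoopExact query_plan plans),
       (if c.isSome then c else pvLoopContain (pvNormalize query_plan) plans),
       plans.foldl (pvStepOverlap (pvSignificant query_plan)) (b, m)) := by
  induction plans generalizing e c b m with
  | nil => cases e <;> cases c <;> simp [pvLoopExact, pvLoopContain]
  | cons p rest ih =>
    simp only [List.foldl_cons, pvStepB, pvLoopExact, pvLoopContain, pvStepOverlap]
    cases e <;> cases c <;>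
      simp only [Option.isNone_none, Option.isNone_some, Bool.true_and, Bool.false_and,
        Option.isSome_some, if_true] <;>
      split_ifs <;>
      simp_all

-- ===== VERDICT (by name: the statement is the Claim_ definition above) =====
theorem find_closest_plan_name_py_spec : Claim_equal_find_closest_plan_name_py := by
  intro query_plan all_plans _
  unfold Spec_find_closest_plan_name_py find_closest_plan_name_py find_closest_plan_name_py_alt
  by_cases h : all_plans.isEmpty
  · simp [h]
  · simp only [h, Bool.false_eq_true, if_false]
    rw [pvFoldB_eq]
    cases hE : pvLoopExact query_plan all_plans <;>
      cases hC : pvLoopContain (pvNormalize query_plan) all_plans <;> simp
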